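-- pv_equiv track=rewrite | github.com/Epecb/vk-playlist-download | decode.py | vk_o
-- ===== SOURCE A (Python) =====
-- __vkstr__ = "abcdefghijklmnopqrstuvwxyzABCDEFGHIJKLMN0PQRSTUVWXYZO123456789+/="
--
-- def vk_o(vstr):
--     """
--     function a(t) {
--     """
--     result = ""
--     index2 = 0
--     i = 0
--     for j in range(len(vstr)):
--         sym_index = __vkstr__.find(vstr[j])
--         if sym_index != -1:
--             # i = ((index2 % 4) != 0) ? ((i << 6) + sym_index) : sym_index
--             i = ((i << 6) + sym_index) if ((index2 % 4) != 0) else sym_index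
--             if(index2 % 4) != 0:
--                 index2 += 1
--                 shift = -2 * index2 & 6
--                 result += chr(0xFF & (i >> shift))
--             else:
--                 index2 += 1
--     return result
-- ===== SOURCE B (Python) =====
-- __vkstr__ = "abcdefghijklmnopqrstuvwxyzABCDEFGHIJKLMN0PQRSTUVWXYZO123456789+/="
-- _TABLE = {c: i for i, c in enumerate(__vkstr__)}
--
-- def vk_o(vstr):
--     vals = [_TABLE[c] for c in vstr if c in _TABLE]
--     out = []
--     for k in range(0, len(vals), 4):
--         s = vals[k:k+4]
--         if len(s) >= 2:
--             out.append(chr(0xFF & (((s[0] << 6) + s[1]) >> 4)))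
--         if len(s) >= 3:
--             out.append(chr(0xFF & (((s[1] << 6) + s[2]) >> 2)))
--         if len(s) == 4:
--             out.append(chr(0xFF & ((s[2] << 6) + s[3])))
--     return "".join(out)
-- ===== Notes on version B (the rewrite author's own statement) =====
-- stated objective: faster
-- what changed: B replaces A's per-character linear scan of the 65-char alphabet (str.find) with a dict lookup table built once, and decodes the collected sextet list in chunks of four with fixed shift constants instead of A's running bit-accumulator with index2-modular shift arithmetic.
import Mathlib
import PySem

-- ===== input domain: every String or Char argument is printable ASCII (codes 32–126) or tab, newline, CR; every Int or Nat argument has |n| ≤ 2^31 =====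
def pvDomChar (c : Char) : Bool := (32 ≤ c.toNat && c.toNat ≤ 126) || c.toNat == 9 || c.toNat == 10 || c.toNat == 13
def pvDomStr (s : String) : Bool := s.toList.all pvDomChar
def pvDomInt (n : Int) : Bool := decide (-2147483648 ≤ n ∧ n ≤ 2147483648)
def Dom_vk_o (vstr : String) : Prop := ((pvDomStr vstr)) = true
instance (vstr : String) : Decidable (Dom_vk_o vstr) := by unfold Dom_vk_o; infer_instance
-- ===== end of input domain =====

-- B replaces A's per-character linear scan of the 65-character alphabet (str.find) by a dict
-- lookup table built once, and decodes the sextet list in chunks of four instead of tracking a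
-- running bit accumulator; return value only, no argument is mutated.

-- the VK alphabet, shared module constant of both Pythons
def vkstr : String := "abcdefghijklmnopqrstuvwxyzABCDEFGHIJKLMN0PQRSTUVWXYZO123456789+/="

-- chr(x); exact for 0 ≤ x < 0xD800 — every emitted byte here is masked with 0xFF, so 0 ≤ x ≤ 255
def pyChr (x : Int) : Char := Char.ofNat x.toNat

-- ===== PORT A =====
-- one iteration of A's `for j in range(len(vstr))` body; state = (result, index2, i)
-- `i >> shift`: shift = -2*index2 & 6 ∈ {0,2,4,6} is nonneg, so `.toNat` is exact
def vkStepA (st : List Char × Int × Int) (c : Char) : List Char × Int × Int :=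
  let symIndex := PySem.Str.find vkstr (String.singleton c)
  if symIndex ≠ -1 then
    let i' := if PySem.Int.mod st.2.1 4 ≠ 0 then (st.2.2 <<< (6 : Nat)) + symIndex else symIndex
    if PySem.Int.mod st.2.1 4 ≠ 0 then
      let index2' := st.2.1 + 1
      let shift := PySem.Int.band (-2 * index2') 6
      (st.1 ++ [pyChr (PySem.Int.band 0xFF (i' >>> shift.toNat))], index2', i')
    else (st.1, st.2.1 + 1, i')
  else st

def vk_o (vstr : String) : String :=
  String.ofList (vstr.toList.foldl vkStepA ([], 0, 0)).1

-- ===== PORT B =====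
-- _TABLE = {c: i for i, c in enumerate(__vkstr__)}
def vkTable : PySem.Dict Char Int :=
  (PySem.List.enumerate vkstr.toList).foldl (fun d p => d.insert p.2 p.1) PySem.Dict.empty

-- the three masked output bytes of one four-sextet chunk
def vkByte1 (s0 s1 : Int) : Char := pyChr (PySem.Int.band 0xFF (((s0 <<< (6 : Nat)) + s1) >>> (4 : Nat)))
def vkByte2 (s1 s2 : Int) : Char := pyChr (PySem.Int.band 0xFF (((s1 <<< (6 : Nat)) + s2) >>> (2 : Nat)))
def vkByte3 (s2 s3 : Int) : Char := pyChr (PySem.Int.band 0xFF ((s2 <<< (6 : Nat)) + s3))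

-- B's `for k in range(0, len(vals), 4)` loop over the slices vals[k:k+4]
def vkChunks : List Int → List Char
  | [] => []
  | [_] => []
  | [s0, s1] => [vkByte1 s0 s1]
  | [s0, s1, s2] => [vkByte1 s0 s1, vkByte2 s1 s2]
  | s0 :: s1 :: s2 :: s3 :: rest => vkByte1 s0 s1 :: vkByte2 s1 s2 :: vkByte3 s2 s3 :: vkChunks rest

def vk_o_alt (vstr : String) : String :=
  let vals := vstr.toList.filterMap (fun c => vkTable.get? c)
  String.ofList (vkChunks vals)

-- ===== PRECONDITION & SPEC =====
def Spec_vk_o (vstr : String) (out : String) : Prop := out = vk_o_alt vstr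
instance (vstr : String) (out : String) : Decidable (Spec_vk_o vstr out) := by unfold Spec_vk_o; infer_instance

-- ===== CLAIM (what is proved, stated in full; the proofs are below) =====
def Claim_equal_vk_o : Prop := ∀ (vstr : String), Dom_vk_o vstr → Spec_vk_o vstr (vk_o vstr)

-- ===== LEMMAS AND PROOFS =====

-- A's loop body with the found sextet value already in hand
def vkStepV (st : List Char × Int × Int) (s : Int) : List Char × Int × Int :=
  let i' := if PySem.Int.mod st.2.1 4 ≠ 0 then (st.2.2 <<< (6 : Nat)) + s else s
  if PySem.Int.mod st.2.1 4 ≠ 0 then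
    let index2' := st.2.1 + 1
    let shift := PySem.Int.band (-2 * index2') 6
    (st.1 ++ [pyChr (PySem.Int.band 0xFF (i' >>> shift.toNat))], index2', i')
  else (st.1, st.2.1 + 1, i')

-- table lookup agrees with str.find on every domain character, and its values are nonnegative
def vkTblCheck (n : Nat) : Bool :=
  match vkTable.get? (Char.ofNat n) with
  | none => PySem.Str.find vkstr (String.singleton (Char.ofNat n)) == -1
  | some v => (v == PySem.Str.find vkstr (String.singleton (Char.ofNat n))) && (0 ≤ v)

set_option maxRecDepth 20000 in
theorem vkTblCheck_all : (List.range 127).all vkTblCheck = true := by decide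

theorem table_eq_find (c : Char) (hc : pvDomChar c = true) :
    (vkTable.get? c = if PySem.Str.find vkstr (String.singleton c) = -1 then none
        else some (PySem.Str.find vkstr (String.singleton c))) ∧
    (∀ v, vkTable.get? c = some v → 0 ≤ v) := by
  have hn : c.toNat < 127 := by
    simp [pvDomChar] at hc
    omega
  have hmem : c.toNat ∈ List.range 127 := List.mem_range.mpr hn
  have hchk := (List.all_eq_true.mp vkTblCheck_all) _ hmem
  have hco : Char.ofNat c.toNat = c := Char.ofNat_toNat c
  unfold vkTblCheck at hchk
  rw [hco] at hchk
  constructor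
  · cases h : vkTable.get? c with
    | none =>
      rw [h] at hchk; simp only at hchk
      rw [if_pos (by exact_mod_cast eq_of_beq hchk)]
    | some v =>
      rw [h] at hchk; simp only [Bool.and_eq_true, beq_iff_eq, decide_eq_true_eq] at hchk
      rw [if_neg (by omega), hchk.1]
  · intro v hv
    rw [hv] at hchk; simp only [Bool.and_eq_true, beq_iff_eq, decide_eq_true_eq] at hchk
    omega

-- folding A's step over the characters = folding the value step over the looked-up sextets
theorem foldA_eq_foldV (cs : List Char) (hcs : ∀ c ∈ cs, pvDomChar c = true) :
    ∀ st, cs.foldl vkStepA st = (cs.filterMap (fun c => vkTable.get? c)).foldl vkStepV st := by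
  induction cs with
  | nil => intro st; rfl
  | cons c cs ih =>
    intro st
    have hc := hcs c (by simp)
    have htbl := table_eq_find c hc
    have ih' := ih (fun x hx => hcs x (by simp [hx]))
    simp only [List.foldl_cons, List.filterMap_cons]
    cases h : vkTable.get? c with
    | none =>
      have hf : PySem.Str.find vkstr (String.singleton c) = -1 := by
        rcases htbl.1 with h1
        rw [h] at h1
        by_contra hne
        rw [if_neg hne] at h1
        simp at h1
      have : vkStepA st c = st := by
        unfold vkStepA
        rw [hf]
        simp
      rw [this, ih']
    | some v =>
      have hv0 : 0 ≤ v := htbl.2 v h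
      have hf : PySem.Str.find vkstr (String.singleton c) = v := by
        rcases htbl.1 with h1
        rw [h] at h1
        by_cases hne : PySem.Str.find vkstr (String.singleton c) = -1
        · rw [if_pos hne] at h1; simp at h1
        · rw [if_neg hne] at h1; exact (Option.some_inj.mp h1).symm
      have : vkStepA st c = vkStepV st v := by
        unfold vkStepA vkStepV
        rw [hf, if_pos (by omega)]
      rw [this, List.foldl_cons, ih']

-- ---- bit-arithmetic facts ----

theorem land6_mod (x : Nat) : 6 &&& x = 6 &&& (x % 8) := by
  apply Nat.eq_of_testBit_eq
  intro i
  simp only [Nat.testBit_land]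
  rcases Nat.lt_or_ge i 3 with h | h
  · have : x % 8 = x % 2 ^ 3 := by norm_num
    rw [this, Nat.testBit_mod_two_pow]
    simp [h]
  · have : Nat.testBit 6 i = false := Nat.testBit_eq_false_of_lt (by
      calc (6:Nat) < 2^3 := by norm_num
      _ ≤ 2^i := Nat.pow_le_pow_right (by norm_num) h)
    simp [this]

theorem band_neg_six (a : Int) (ha : a < 0) :
    PySem.Int.band a 6 = 6 - (6 &&& (-a-1).toNat : Nat) := by
  unfold PySem.Int.band
  rw [if_neg (by omega), if_pos (by norm_num)]
  have h1 : ((6:Int).toNat) = 6 := by decide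
  rw [h1]
  have hle : (6 &&& (-a-1).toNat) ≤ 6 := Nat.and_le_left ..
  omega


-- band 0xFF of a nonnegative Int is mod 256
theorem band255 (x : Int) (hx : 0 ≤ x) : PySem.Int.band 0xFF x = x % 256 := by
  rw [PySem.Int.band_comm, PySem.Int.band_of_nonneg hx (by norm_num)]
  have h1 : ((0xFF : Int).toNat) = 255 := by decide
  rw [h1]
  have h2 : x.toNat &&& 255 = x.toNat % 256 := Nat.and_two_pow_sub_one_eq_mod x.toNat 8
  rw [h2]
  omega

theorem shl6 (x : Int) : x <<< (6 : Nat) = x * 64 := by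
  rw [Int.shiftLeft_eq]; norm_num

theorem shr2 (x : Int) : x >>> (2 : Nat) = x / 4 := by
  rw [Int.shiftRight_eq_div_pow]; norm_num

theorem shr0 (x : Int) : x >>> (0 : Nat) = x := by
  rw [Int.shiftRight_eq_div_pow]; norm_num

-- Python '%' on x ≥ 0 by 4: used to evaluate index2 % 4 in the loop
theorem mod4 (x : Int) : PySem.Int.mod x 4 = x % 4 :=
  PySem.Int.mod_eq_emod_of_pos (by norm_num)

-- A's running-accumulator byte 2 equals B's local byte 2 (the s0-part is a multiple of 1024 after >>2)
theorem byte2_eq (s0 s1 s2 : Int) (h0 : 0 ≤ s0) (h1 : 0 ≤ s1) (h2 : 0 ≤ s2) :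
    pyChr (PySem.Int.band 0xFF (((((s0 <<< (6:Nat)) + s1) <<< (6:Nat)) + s2) >>> (2 : Nat))) =
    vkByte2 s1 s2 := by
  unfold vkByte2
  congr 1
  rw [shl6, shl6, shl6, shr2, shr2]
  rw [band255 _ (Int.ediv_nonneg (by positivity) (by norm_num)),
      band255 _ (Int.ediv_nonneg (by positivity) (by norm_num))]
  omega

-- A's running-accumulator byte 3 equals B's local byte 3
theorem byte3_eq (s0 s1 s2 s3 : Int) (h0 : 0 ≤ s0) (h1 : 0 ≤ s1) (h2 : 0 ≤ s2) (h3 : 0 ≤ s3) :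
    pyChr (PySem.Int.band 0xFF ((((((s0 <<< (6:Nat)) + s1) <<< (6:Nat)) + s2) <<< (6:Nat)) + s3)) =
    vkByte3 s2 s3 := by
  unfold vkByte3
  congr 1
  rw [shl6, shl6, shl6, shl6]
  rw [band255 _ (by positivity), band255 _ (by positivity)]
  omega

theorem byte1_eq (s0 s1 : Int) :
    pyChr (PySem.Int.band 0xFF (((s0 <<< (6:Nat)) + s1) >>> (4 : Nat))) = vkByte1 s0 s1 := rfl

-- ---- the main loop correspondence ----

theorem stepV_mod0 (res : List Char) (n i s : Int) (h : n % 4 = 0) :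
    vkStepV (res, n, i) s = (res, n + 1, s) := by
  unfold vkStepV
  rw [mod4]
  simp [h]

theorem stepV_emit (res : List Char) (n i s : Int) (h : ¬ n % 4 = 0) :
    vkStepV (res, n, i) s =
      (res ++ [pyChr (PySem.Int.band 0xFF (((i <<< (6:Nat)) + s) >>>
          (PySem.Int.band (-2 * (n + 1)) 6).toNat))], n + 1, (i <<< (6:Nat)) + s) := by
  unfold vkStepV
  rw [mod4]
  simp [h]

-- the three shift values `-2*index2 & 6` of a chunk starting at index2 = 4*m
theorem shiftv1 (m : Nat) : (PySem.Int.band (-2 * ((4*(m:Int)+1) + 1)) 6).toNat = 4 := by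
  have e : (-2 * ((4*(m:Int)+1) + 1)) = -(8*(m:Int) + 4) := by ring
  rw [e, band_neg_six _ (by omega), land6_mod]
  have h2 : ((-(-(8 * (m : Int) + 4)) - 1)).toNat = 8 * m + 3 := by omega
  rw [h2, show (8 * m + 3) % 8 = 3 by omega]
  decide
theorem shiftv2 (m : Nat) : (PySem.Int.band (-2 * ((4*(m:Int)+1+1) + 1)) 6).toNat = 2 := by
  have e : (-2 * ((4*(m:Int)+1+1) + 1)) = -(8*(m:Int) + 6) := by ring
  rw [e, band_neg_six _ (by omega), land6_mod]
  have h2 : ((-(-(8 * (m : Int) + 6)) - 1)).toNat = 8 * m + 5 := by omega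
  rw [h2, show (8 * m + 5) % 8 = 5 by omega]
  decide
theorem shiftv3 (m : Nat) : (PySem.Int.band (-2 * ((4*(m:Int)+1+1+1) + 1)) 6).toNat = 0 := by
  have e : (-2 * ((4*(m:Int)+1+1+1) + 1)) = -(8*(m:Int) + 8) := by ring
  rw [e, band_neg_six _ (by omega), land6_mod]
  have h2 : ((-(-(8 * (m : Int) + 8)) - 1)).toNat = 8 * m + 7 := by omega
  rw [h2, show (8 * m + 7) % 8 = 7 by omega]
  decide

theorem foldV_chunks (vals : List Int) :
    ∀ (res : List Char) (i : Int) (m : Nat), (∀ v ∈ vals, 0 ≤ v) →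
      (vals.foldl vkStepV (res, 4 * (m : Int), i)).1 = res ++ vkChunks vals := by
  induction vals using vkChunks.induct with
  | case1 => intro res i m _; simp [vkChunks]
  | case2 s0 =>
    intro res i m _
    simp only [List.foldl_cons, List.foldl_nil]
    rw [stepV_mod0 res (4*(m:Int)) i s0 (by omega)]
    simp [vkChunks]
  | case3 s0 s1 =>
    intro res i m _
    simp only [List.foldl_cons, List.foldl_nil]
    rw [stepV_mod0 res (4*(m:Int)) i s0 (by omega)]
    rw [stepV_emit res (4*(m:Int)+1) s0 s1 (by omega)]
    rw [shiftv1 m, byte1_eq]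
    simp [vkChunks]
  | case4 s0 s1 s2 =>
    intro res i m hv
    have h0 := hv s0 (by simp); have h1 := hv s1 (by simp); have h2 := hv s2 (by simp)
    simp only [List.foldl_cons, List.foldl_nil]
    rw [stepV_mod0 res (4*(m:Int)) i s0 (by omega)]
    rw [stepV_emit res (4*(m:Int)+1) s0 s1 (by omega)]
    rw [shiftv1 m, byte1_eq]
    rw [stepV_emit (res ++ [vkByte1 s0 s1]) (4*(m:Int)+1+1) ((s0 <<< (6:Nat)) + s1) s2 (by omega)]
    rw [shiftv2 m, byte2_eq s0 s1 s2 h0 h1 h2]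
    simp [vkChunks]
  | case5 s0 s1 s2 s3 rest ih =>
    intro res i m hv
    have h0 := hv s0 (by simp); have h1 := hv s1 (by simp)
    have h2 := hv s2 (by simp); have h3 := hv s3 (by simp)
    simp only [List.foldl_cons]
    rw [stepV_mod0 res (4*(m:Int)) i s0 (by omega)]
    rw [stepV_emit res (4*(m:Int)+1) s0 s1 (by omega)]
    rw [shiftv1 m, byte1_eq]
    rw [stepV_emit (res ++ [vkByte1 s0 s1]) (4*(m:Int)+1+1) ((s0 <<< (6:Nat)) + s1) s2 (by omega)]
    rw [shiftv2 m, byte2_eq s0 s1 s2 h0 h1 h2]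
    rw [stepV_emit (res ++ [vkByte1 s0 s1] ++ [vkByte2 s1 s2]) (4*(m:Int)+1+1+1)
        (((s0 <<< (6:Nat)) + s1) <<< (6:Nat) + s2) s3 (by omega)]
    rw [shiftv3 m]
    rw [shr0 ((((s0 <<< (6:Nat)) + s1) <<< (6:Nat) + s2) <<< (6:Nat) + s3)]
    rw [byte3_eq s0 s1 s2 s3 h0 h1 h2 h3]
    have hc : (4*(m:Int)+1+1+1+1) = 4 * ((m+1 : Nat) : Int) := by push_cast; ring
    rw [hc, ih (res ++ [vkByte1 s0 s1] ++ [vkByte2 s1 s2] ++ [vkByte3 s2 s3])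
        ((((s0 <<< (6:Nat)) + s1) <<< (6:Nat) + s2) <<< (6:Nat) + s3) (m+1)
        (fun v hvm => hv v (by simp [hvm]))]
    simp [vkChunks]

theorem toList_nonneg (vstr : String) (v : Int)
    (hv : v ∈ vstr.toList.filterMap (fun c => vkTable.get? c)) (hd : Dom_vk_o vstr) : 0 ≤ v := by
  rcases List.mem_filterMap.mp hv with ⟨c, hc, hg⟩
  have hdc : pvDomChar c = true := by
    have := hd
    unfold Dom_vk_o pvDomStr at this
    exact List.all_eq_true.mp this c hc
  exact (table_eq_find c hdc).2 v hg

-- ===== VERDICT (by name: the statement is the Claim_ definition above) =====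
theorem vk_o_spec : Claim_equal_vk_o := by
  intro vstr hd
  unfold Spec_vk_o vk_o vk_o_alt
  have hdall : ∀ c ∈ vstr.toList, pvDomChar c = true := by
    unfold Dom_vk_o pvDomStr at hd
    exact List.all_eq_true.mp hd
  rw [foldA_eq_foldV _ hdall]
  have := foldV_chunks (vstr.toList.filterMap (fun c => vkTable.get? c)) [] 0 0
    (fun v hv => toList_nonneg vstr v hv hd)
  norm_num at this
  rw [this]
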